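-- pv_equiv track=rewrite | github.com/miliar/Code_Jam_Webscraper | solutions_python/solutions_year13_round0_nr2/529.py | isRowPath
-- ===== SOURCE A (Python) =====
-- def isRowPath(board,i,j):
--     #first we check the right side
--     isRight=True
--     k=j+1
--     while(k<len(board[i])):
--         if(board[i][k]>board[i][j]):
--             isRight=False
--         k+=1
--     #Left side
--     isLeft=True
--     k=j-1
--     while(k>=0):
--         if(board[i][k]>board[i][j]):
--             isLeft=False
--         k-=1
--     return isLeft and isRight
-- ===== SOURCE B (Python) =====
-- def isRowPath(board, i, j):
--     # sort the row; its value is a row path iff it ends up at the top of the sorted order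
--     return board[i][j] == sorted(board[i])[-1]
-- ===== Notes on version B (the rewrite author's own statement) =====
-- stated objective: alternative
-- what changed: Replaces A's two directional dominance-checking while-loops with sorting the row and comparing the element against the last (largest) element of the sorted copy.
-- outside the precondition, e.g. on isRowPath([[]], 0, 0): A returns True, B raises IndexError
import Mathlib
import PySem

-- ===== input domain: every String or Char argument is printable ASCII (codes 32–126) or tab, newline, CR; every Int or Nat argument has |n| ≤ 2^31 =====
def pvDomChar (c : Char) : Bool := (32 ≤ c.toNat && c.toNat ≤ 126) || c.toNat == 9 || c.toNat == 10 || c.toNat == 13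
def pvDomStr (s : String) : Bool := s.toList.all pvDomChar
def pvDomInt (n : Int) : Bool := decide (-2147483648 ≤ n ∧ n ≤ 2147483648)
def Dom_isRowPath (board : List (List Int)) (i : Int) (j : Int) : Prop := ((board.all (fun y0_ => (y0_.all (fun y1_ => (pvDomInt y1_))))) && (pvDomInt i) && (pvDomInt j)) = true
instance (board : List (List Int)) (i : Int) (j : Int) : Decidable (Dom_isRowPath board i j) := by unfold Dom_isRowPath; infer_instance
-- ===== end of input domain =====

-- B sorts the row and compares the element with the last (largest) of the sorted copy,
-- instead of A's two directional dominance scans; same return value on Pre_.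

-- ===== PORT A =====
def isRowPath (board : List (List Int)) (i : Int) (j : Int) : Bool :=
  let row := (PySem.List.pyGet? board i).getD []
  let v := PySem.List.pyGetD row j 0
  let isRight := (PySem.List.pyRange (j + 1) (row.length : Int) 1).foldl
      (fun acc k => if PySem.List.pyGetD row k 0 > v then false else acc) true
  let isLeft := (PySem.List.pyRange (j - 1) (-1) (-1)).foldl
      (fun acc k => if PySem.List.pyGetD row k 0 > v then false else acc) true
  isLeft && isRight

-- ===== PORT B =====
def isRowPath_alt (board : List (List Int)) (i : Int) (j : Int) : Bool :=
  let row := (PySem.List.pyGet? board i).getD []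
  PySem.List.pyGetD row j 0
    == PySem.List.pyGetD (PySem.List.sorted row (fun x => x) false) (-1) 0

-- ===== PRECONDITION & SPEC =====
-- Pre_ excludes out-of-range indices: A raises IndexError on all of them except an empty
-- row with j ∈ {-1, 0}, where A's loops never run and it returns True while B raises.
def Pre_isRowPath (board : List (List Int)) (i : Int) (j : Int) : Prop :=
  PySem.Raise.InRange board.length i ∧
  PySem.Raise.InRange ((PySem.List.pyGet? board i).getD []).length j
instance (board : List (List Int)) (i : Int) (j : Int) : Decidable (Pre_isRowPath board i j) := by unfold Pre_isRowPath; infer_instance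

def pvWitness_isRowPath : List (List Int) × Int × Int := ([[1, 3, 2]], 0, 1)

def Spec_isRowPath (board : List (List Int)) (i : Int) (j : Int) (out : Bool) : Prop := out = isRowPath_alt board i j
instance (board : List (List Int)) (i : Int) (j : Int) (out : Bool) : Decidable (Spec_isRowPath board i j out) := by unfold Spec_isRowPath; infer_instance

-- ===== CLAIM (what is proved, stated in full; the proofs are below) =====
def Claim_equal_isRowPath : Prop := ∀ (board : List (List Int)) (i : Int) (j : Int), Dom_isRowPath board i j → Pre_isRowPath board i j → Spec_isRowPath board i j (isRowPath board i j)

-- ===== LEMMAS AND PROOFS =====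

-- a guarded flag-clearing foldl is List.all of the negated guard
theorem foldl_guard (p : Int → Prop) [DecidablePred p] (l : List Int) (b : Bool) :
    l.foldl (fun acc k => if p k then false else acc) b = (b && l.all (fun k => decide ¬ p k)) := by
  induction l generalizing b with
  | nil => simp
  | cons x t ih =>
    simp only [List.foldl_cons, List.all_cons, ih]
    by_cases h : p x <;> simp [h]

theorem inRange_of (n : Nat) (i : Int) (h1 : -(n : Int) ≤ i) (h2 : i < (n : Int)) :
    PySem.Raise.InRange n i := ⟨h1, h2⟩

-- the last element of sorted(row) is an upper bound of row
theorem sorted_getLast_isMax (row : List Int)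
    (h : PySem.List.sorted row (fun x => x) false ≠ []) :
    ∀ x ∈ row, x ≤ (PySem.List.sorted row (fun x => x) false).getLast h := by
  intro x hx
  set s := PySem.List.sorted row (fun x => x) false with hs
  have hxs : x ∈ s := by rw [hs, PySem.List.mem_sorted]; exact hx
  obtain ⟨p, hp, hxe⟩ := List.mem_iff_getElem.mp hxs
  rw [List.getLast_eq_getElem]
  calc x = s[p] := hxe.symm
    _ ≤ s[s.length - 1] := by
        have := PySem.List.sorted_id_getElem_mono (xs := row)
          (p := p) (q := s.length - 1) (by omega) (by rw [← hs]; omega)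
        simpa [← hs] using this

theorem isRowPath_spec_aux (row : List Int) (j : Int)
    (hj : PySem.Raise.InRange row.length j) :
    ((PySem.List.pyRange (j - 1) (-1) (-1)).foldl
        (fun acc k => if PySem.List.pyGetD row k 0 > PySem.List.pyGetD row j 0 then false else acc) true &&
     (PySem.List.pyRange (j + 1) (row.length : Int) 1).foldl
        (fun acc k => if PySem.List.pyGetD row k 0 > PySem.List.pyGetD row j 0 then false else acc) true)
    = (PySem.List.pyGetD row j 0
        == PySem.List.pyGetD (PySem.List.sorted row (fun x => x) false) (-1) 0) := by
  obtain ⟨hj1, hj2⟩ : -(row.length : Int) ≤ j ∧ j < (row.length : Int) := hj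
  set v := PySem.List.pyGetD row j 0 with hv
  have hvmem : v ∈ row := PySem.List.pyGetD_mem row 0 (inRange_of _ _ hj1 hj2)
  have hne : row ≠ [] := by
    intro h; subst h; simp at hj1 hj2; omega
  have hsne : PySem.List.sorted row (fun x => x) false ≠ [] := by
    rw [Ne, PySem.List.sorted_eq_nil_iff]; exact hne
  set m := (PySem.List.sorted row (fun x => x) false).getLast hsne with hm
  have hlast : PySem.List.pyGetD (PySem.List.sorted row (fun x => x) false) (-1) 0 = m :=
    PySem.List.pyGetD_neg_one _ 0 hsne
  have hmmem : m ∈ row := by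
    rw [← PySem.List.mem_sorted (key := fun x => x) (rev := false)]
    exact List.getLast_mem hsne
  have hmmax : ∀ y ∈ row, y ≤ m := sorted_getLast_isMax row hsne
  rw [foldl_guard, foldl_guard, hlast]
  rw [Bool.eq_iff_iff]
  simp only [Bool.true_and, Bool.and_eq_true, List.all_eq_true, decide_eq_true_eq, not_lt,
    beq_iff_eq]
  constructor
  · rintro ⟨hleft, hright⟩
    -- every element of the row is ≤ v, hence v is the maximum
    have hall : ∀ x ∈ row, x ≤ v := by
      intro x hx
      obtain ⟨idx, hidx, hxe⟩ := List.mem_iff_getElem.mp hx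
      by_cases hjpos : 0 ≤ j
      · by_cases hij : (idx : Int) = j
        · have : v = x := by
            rw [hv, PySem.List.pyGetD_eq_getElem row 0 hjpos hj2]
            simp [show j.toNat = idx from by omega, hxe]
          omega
        · have hmem : PySem.List.pyGetD row (idx : Int) 0 ≤ v := by
            by_cases hlt : (idx : Int) < j
            · exact hleft _ (PySem.List.mem_pyRange_neg_one.mpr ⟨by omega, by omega⟩)
            · exact hright _ (PySem.List.mem_pyRange_one.mpr ⟨by omega, by omega⟩)
          rw [PySem.List.pyGetD_eq_getElem row 0 (by omega) (by omega)] at hmem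
          simpa only [Int.toNat_natCast, hxe] using hmem
      · -- j negative: the right-hand range covers every index 0 ≤ idx < len
        have hmem : PySem.List.pyGetD row (idx : Int) 0 ≤ v :=
          hright _ (PySem.List.mem_pyRange_one.mpr ⟨by omega, by omega⟩)
        rw [PySem.List.pyGetD_eq_getElem row 0 (by omega) (by omega)] at hmem
        simpa only [Int.toNat_natCast, hxe] using hmem
    have h1 : m ≤ v := hall m hmmem
    have h2 : v ≤ m := hmmax v hvmem
    omega
  · rintro hvm
    have hall : ∀ x ∈ row, x ≤ v := by
      intro x hx; rw [hvm]; exact hmmax x hx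
    constructor
    · intro k hk
      obtain ⟨hk1, hk2⟩ := PySem.List.mem_pyRange_neg_one.mp hk
      exact hall _ (PySem.List.pyGetD_mem row 0 (inRange_of _ _ (by omega) (by omega)))
    · intro k hk
      obtain ⟨hk1, hk2⟩ := PySem.List.mem_pyRange_one.mp hk
      exact hall _ (PySem.List.pyGetD_mem row 0 (inRange_of _ _ (by omega) (by omega)))

-- ===== VERDICT (by name: the statement is the Claim_ definition above) =====
theorem isRowPath_spec : Claim_equal_isRowPath := by
  intro board i j _ hpre
  obtain ⟨hi, hj⟩ := hpre
  show isRowPath board i j = isRowPath_alt board i j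
  unfold isRowPath isRowPath_alt
  exact isRowPath_spec_aux _ j hj
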